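-- pv_equiv track=rewrite | github.com/BHARATHMUTHYALA/Interesting-Computer-Networks | WEEK 1/calculate_parity.py | dynamic_escape_char
-- ===== SOURCE A (Python) =====
-- def dynamic_escape_char(data):
--
--     possible_escape_chars=['1101101','1101010','01110110']
--     sequence_count={esc: data.count(esc) for esc in possible_escape_chars}
--
--     for escape_char in  sorted(sequence_count, key=sequence_count.get):
--         if escape_char not in data:
--             return escape_char
--     least_used_character =  min(sequence_count, key=sequence_count.get)
--
--
--
--     modified_least_used_Character = least_used_character + '0'
--     return modified_least_used_Character if modified_least_used_Character not in data else least_used_character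
-- ===== SOURCE B (Python) =====
-- def dynamic_escape_char(data):
--     escape_chars = ['1101101', '1101010', '01110110']
--     # a char is absent iff its count is 0, and the stable sort keeps list order
--     # on ties, so the first absent char in list order is A's answer
--     for c in escape_chars:
--         if c not in data:
--             return c
--     least = min(escape_chars, key=data.count)
--     candidate = least + '0'
--     return candidate if candidate not in data else least
-- ===== Notes on version B (the rewrite author's own statement) =====
-- stated objective: simpler
-- what changed: Dropped the count dict and the sort: absence (count 0) of one of the three fixed strings is checked directly in list order (stable sort on ties makes this A's order), and only the all-present fallback uses min by count.
import Mathlib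
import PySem

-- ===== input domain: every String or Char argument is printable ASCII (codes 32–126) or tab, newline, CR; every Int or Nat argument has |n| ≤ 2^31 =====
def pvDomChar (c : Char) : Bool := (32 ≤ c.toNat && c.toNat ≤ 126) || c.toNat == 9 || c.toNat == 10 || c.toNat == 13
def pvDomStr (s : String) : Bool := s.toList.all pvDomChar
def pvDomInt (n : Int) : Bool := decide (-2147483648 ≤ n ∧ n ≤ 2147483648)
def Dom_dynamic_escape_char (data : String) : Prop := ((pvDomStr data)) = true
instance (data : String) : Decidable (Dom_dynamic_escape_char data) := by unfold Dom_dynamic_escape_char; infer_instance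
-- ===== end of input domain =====

-- B drops A's count dict and sort: it returns the first of the three fixed strings
-- absent from data (objective: simpler); the all-present fallback uses min by count as A does.


-- ===== PORT A =====

-- the fixed list possible_escape_chars
def pvEsc : List String := ["1101101", "1101010", "01110110"]

-- 'for escape_char in L: if escape_char not in data: return escape_char' (early-return loop)
def pvLoopA (l : List String) (data : String) : Option String :=
  match l with
  | [] => none
  | e :: rest => if PySem.Str.isIn e data = false then some e else pvLoopA rest data

def dynamic_escape_char (data : String) : String :=
  let seq : PySem.Dict String Int :=
    pvEsc.foldl (fun d e => d.insert e (PySem.Str.count data e : Int)) PySem.Dict.empty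
  -- sequence_count.get k; all keys are present, so the default 0 is never used
  let kf : String → Int := fun k => seq.getD k 0
  match pvLoopA (PySem.List.sorted seq.keys kf) data with
  | some e => e
  | none =>
    match PySem.List.min? seq.keys kf with
    | some least =>
      let modified := least ++ "0"
      if PySem.Str.isIn modified data = false then modified else least
    | none => ""   -- unreachable (the dict is never empty); totality guard only

-- ===== PORT B =====

-- B's loop: first escape char not contained in data, in list order
def pvFirstAbsent (l : List String) (data : String) : Option String :=
  match l with
  | [] => none
  | c :: rest => if PySem.Str.isIn c data = false then some c else pvFirstAbsent rest data

def dynamic_escape_char_alt (data : String) : String :=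
  match pvFirstAbsent pvEsc data with
  | some c => c
  | none =>
    match PySem.List.min? pvEsc (fun c => (PySem.Str.count data c : Int)) with
    | some least =>
      let candidate := least ++ "0"
      if PySem.Str.isIn candidate data = false then candidate else least
    | none => ""   -- unreachable (the list is non-empty); totality guard only

-- ===== PRECONDITION & SPEC =====
def Spec_dynamic_escape_char (data : String) (out : String) : Prop := out = dynamic_escape_char_alt data
instance (data : String) (out : String) : Decidable (Spec_dynamic_escape_char data out) := by unfold Spec_dynamic_escape_char; infer_instance

-- ===== CLAIM (what is proved, stated in full; the proofs are below) =====
def Claim_equal_dynamic_escape_char : Prop := ∀ (data : String), Dom_dynamic_escape_char data → Spec_dynamic_escape_char data (dynamic_escape_char data)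

-- ===== LEMMAS AND PROOFS =====

-- acc is a lower bound of count.go
theorem pv_count_go_le (sub : List Char) (fuel : Nat) (l : List Char) (acc : Nat) :
    acc ≤ PySem.Chars.count.go sub fuel l acc := by
  induction fuel generalizing l acc with
  | zero => simp [PySem.Chars.count.go]
  | succ n ih =>
    cases l with
    | nil => simp [PySem.Chars.count.go]
    | cons h t =>
      rw [PySem.Chars.count.go]
      split
      · exact le_trans (Nat.le_succ acc) (ih _ _)
      · exact ih _ _

theorem pv_count_go_of_not_infix (sub : List Char) (fuel : Nat) (l : List Char) (acc : Nat)
    (h : ¬ sub <:+: l) : PySem.Chars.count.go sub fuel l acc = acc := by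
  induction fuel generalizing l acc with
  | zero => simp [PySem.Chars.count.go]
  | succ n ih =>
    cases l with
    | nil => simp [PySem.Chars.count.go]
    | cons hd t =>
      rw [PySem.Chars.count.go]
      have hp : sub.isPrefixOf (hd :: t) = false := by
        rw [Bool.eq_false_iff]
        intro hpre
        exact h ((List.isPrefixOf_iff_prefix.mp hpre).isInfix)
      rw [hp]
      simp only [Bool.false_eq_true, if_false]
      exact ih t acc (fun hinf => h (hinf.trans (List.suffix_cons hd t).isInfix))

theorem pv_count_go_pos (sub : List Char) (hsub : sub ≠ []) (fuel : Nat) (l : List Char)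
    (hfuel : l.length ≤ fuel) (acc : Nat) (h : sub <:+: l) :
    acc + 1 ≤ PySem.Chars.count.go sub fuel l acc := by
  induction fuel generalizing l acc with
  | zero =>
    cases l with
    | nil => exact absurd (List.eq_nil_of_infix_nil h) hsub
    | cons hd t => simp at hfuel
  | succ n ih =>
    cases l with
    | nil => exact absurd (List.eq_nil_of_infix_nil h) hsub
    | cons hd t =>
      rw [PySem.Chars.count.go]
      split
      · exact pv_count_go_le _ _ _ _
      · rename_i hp
        have : sub <:+: t := by
          rcases List.infix_cons_iff.mp h with hpre | hinf
          · exact absurd ((List.isPrefixOf_iff_prefix).mpr hpre) (by simpa using hp)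
          · exact hinf
        exact ih t (by simpa using Nat.le_of_succ_le_succ hfuel) acc this

-- for a non-empty pattern, count data e = 0 iff e is not a substring of data
theorem pv_count_eq_zero_iff (data e : String) (he : e.toList ≠ []) :
    PySem.Str.count data e = 0 ↔ PySem.Str.isIn e data = false := by
  unfold PySem.Str.count PySem.Chars.count
  rw [if_neg (by simpa [List.isEmpty_iff] using he)]
  rw [PySem.Str.isIn_eq, PySem.Chars.isIn_eq_false_iff]
  constructor
  · intro h0 hinf
    have := pv_count_go_pos e.toList he data.toList.length data.toList le_rfl 0 hinf
    omega
  · intro habs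
    exact pv_count_go_of_not_infix _ _ _ _ habs

-- the keys of the count dict are the three escape strings in list order
theorem pv_keys (a b c : Int) :
    (((PySem.Dict.empty.insert "1101101" a).insert "1101010" b).insert "01110110" c).keys = pvEsc := by
  simp [PySem.Dict.keys_insert_of_not_contains, PySem.Dict.contains_insert, pvEsc]

theorem pv_get1 (a b c : Int) :
    (((PySem.Dict.empty.insert "1101101" a).insert "1101010" b).insert "01110110" c).getD "1101101" 0 = a := by
  simp [PySem.Dict.getD_insert]

theorem pv_get2 (a b c : Int) :
    (((PySem.Dict.empty.insert "1101101" a).insert "1101010" b).insert "01110110" c).getD "1101010" 0 = b := by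
  simp [PySem.Dict.getD_insert]

-- ===== VERDICT (by name: the statement is the Claim_ definition above) =====
theorem dynamic_escape_char_spec : Claim_equal_dynamic_escape_char := by
  intro data _
  unfold Spec_dynamic_escape_char dynamic_escape_char dynamic_escape_char_alt
  have h1 := pv_count_eq_zero_iff data "1101101" (by decide)
  have h2 := pv_count_eq_zero_iff data "1101010" (by decide)
  have h3 := pv_count_eq_zero_iff data "01110110" (by decide)
  simp only [pvEsc, List.foldl]
  rw [pv_keys]
  simp only [pvEsc, PySem.List.sorted, PySem.List.min?, List.foldl, Bool.false_eq_true,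
    if_false, PySem.List.insertBy, pv_get1, pv_get2]
  cases hb1 : PySem.Str.isIn "1101101" data <;>
  cases hb2 : PySem.Str.isIn "1101010" data <;>
  cases hb3 : PySem.Str.isIn "01110110" data <;>
  simp only [hb1, hb2, hb3] at h1 h2 h3 <;>
  all_goals (
    repeat' (first
      | omega
      | (split_ifs <;>
         simp_all [pvLoopA, pvFirstAbsent, PySem.List.insertBy, pv_get1, pv_get2])))
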